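-- pv_equiv track=rewrite | github.com/margotphoenix/curly-brackets | curlybrackets/utilities.py | bracket_sections
-- ===== SOURCE A (Python) =====
-- def bracket_sections(size, inc=0, reduced=False):
--     sections = []
--     bsize = 1
--     while bsize < size:
--         bsize *= 2
--     j = 1
--     while j < bsize:
--         j *= 2
--         new_sections = [list(range(k, k+j)) for k in range(inc, bsize+inc, j)]
--         if reduced:
--             sections.append(new_sections)
--         else:
--             sections += new_sections
--     return sections
-- ===== SOURCE B (Python) =====
-- def bracket_sections(size, inc=0, reduced=False):
--     bsize = 1
--     while bsize < size:
--         bsize *= 2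
--     current = [[x] for x in range(inc, inc + bsize)]
--     sections = []
--     while len(current) > 1:
--         nxt = []
--         it = iter(current)
--         for a in it:
--             nxt.append(a + next(it))
--         if reduced:
--             sections.append(nxt)
--         else:
--             sections += nxt
--         current = nxt
--     return sections
-- ===== Notes on version B (the rewrite author's own statement) =====
-- stated objective: alternative
-- what changed: B builds the levels bottom-up by maintaining the current level's blocks and merging adjacent pairs with list concatenation, instead of recomputing every block from stride-based range() calls at each level.
import Mathlib
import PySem

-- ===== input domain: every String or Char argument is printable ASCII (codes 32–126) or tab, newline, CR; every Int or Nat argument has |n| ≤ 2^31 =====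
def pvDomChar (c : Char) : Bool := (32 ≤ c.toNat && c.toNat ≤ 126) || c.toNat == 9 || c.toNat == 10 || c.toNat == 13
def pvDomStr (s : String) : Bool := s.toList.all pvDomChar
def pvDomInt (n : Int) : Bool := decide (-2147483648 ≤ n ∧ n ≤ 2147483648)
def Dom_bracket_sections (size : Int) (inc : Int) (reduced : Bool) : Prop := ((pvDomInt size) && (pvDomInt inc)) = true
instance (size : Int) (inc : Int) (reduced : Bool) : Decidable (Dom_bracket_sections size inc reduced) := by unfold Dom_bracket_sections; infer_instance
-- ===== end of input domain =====

-- B builds levels by merging adjacent pairs of maintained blocks instead of stride-based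
-- range generation per level (objective: alternative; equivalence claimed for reduced = false).

-- ===== PORT A =====
-- bsize = 1; while bsize < size: bsize *= 2
def aBsize (size b : Int) (h : 0 < b) : Int :=
  if b < size then aBsize size (2 * b) (by omega) else b
termination_by (size - b).toNat
decreasing_by omega

-- while j < bsize: j *= 2; new_sections = [...]; append/extend.
-- When reduced is true the Python appends a NESTED level (a list of lists of lists), a value
-- outside the declared type List (List Int); Pre_ excludes reduced = true, and the branch is
-- ported as a no-op there (nothing is claimed outside Pre_).
def aLoop (bsize inc j : Int) (reduced : Bool) (h : 0 < j) : List (List Int) :=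
  if j < bsize then
    (if reduced then []
     else (PySem.List.pyRange inc (bsize + inc) (2 * j)).map
            (fun k => PySem.List.pyRange k (k + 2 * j) 1))
    ++ aLoop bsize inc (2 * j) reduced (by omega)
  else []
termination_by (bsize - j).toNat
decreasing_by omega

def bracket_sections (size : Int) (inc : Int) (reduced : Bool) : List (List Int) :=
  aLoop (aBsize size 1 one_pos) inc 1 reduced one_pos

-- ===== PORT B =====
-- bsize = 1; while bsize < size: bsize *= 2
def bBsize (size b : Int) (h : 0 < b) : Int :=
  if b < size then bBsize size (2 * b) (by omega) else b
termination_by (size - b).toNat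
decreasing_by omega

-- the inner 'for a in it: nxt.append(a + next(it))' pairing loop
def mergePairs : List (List Int) → List (List Int)
  | a :: b :: rest => (a ++ b) :: mergePairs rest
  | _ => []

-- needed by bLoop's termination proof
theorem mergePairs_length : ∀ l : List (List Int), (mergePairs l).length = l.length / 2
  | [] => by simp [mergePairs]
  | [_] => by simp [mergePairs]
  | _ :: _ :: rest => by
      simp only [mergePairs, List.length_cons, mergePairs_length rest]; omega

-- while len(current) > 1: nxt = merge pairs; append/extend; current = nxt
-- (as in port A, the reduced branch's nested append is outside the declared type; no-op here)
def bLoop (current : List (List Int)) (reduced : Bool) : List (List Int) :=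
  if current.length > 1 then
    (if reduced then [] else mergePairs current) ++ bLoop (mergePairs current) reduced
  else []
termination_by current.length
decreasing_by simp only [mergePairs_length]; omega

def bracket_sections_alt (size : Int) (inc : Int) (reduced : Bool) : List (List Int) :=
  bLoop ((PySem.List.pyRange inc (inc + bBsize size 1 one_pos) 1).map (fun x => [x])) reduced

-- ===== PRECONDITION & SPEC =====
-- Pre_ excludes reduced = true: there the Python A returns a NESTED list of levels (depth 3),
-- which is not a value of the declared return type List (List Int).
def Pre_bracket_sections (size : Int) (inc : Int) (reduced : Bool) : Prop := reduced = false
instance (size : Int) (inc : Int) (reduced : Bool) : Decidable (Pre_bracket_sections size inc reduced) := by unfold Pre_bracket_sections; infer_instance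

def pvWitness_bracket_sections : Int × Int × Bool := (8, 3, false)

def Spec_bracket_sections (size : Int) (inc : Int) (reduced : Bool) (out : List (List Int)) : Prop := out = bracket_sections_alt size inc reduced
instance (size : Int) (inc : Int) (reduced : Bool) (out : List (List Int)) : Decidable (Spec_bracket_sections size inc reduced out) := by unfold Spec_bracket_sections; infer_instance

-- ===== CLAIM (what is proved, stated in full; the proofs are below) =====
def Claim_equal_bracket_sections : Prop := ∀ (size : Int) (inc : Int) (reduced : Bool), Dom_bracket_sections size inc reduced → Pre_bracket_sections size inc reduced → Spec_bracket_sections size inc reduced (bracket_sections size inc reduced)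

-- ===== LEMMAS AND PROOFS =====

-- the two bsize loops are the same recursion
theorem bsize_eq (size b : Int) (h : 0 < b) : aBsize size b h = bBsize size b h := by
  refine aBsize.induct size (motive := fun b h => aBsize size b h = bBsize size b h) ?_ ?_ b h
  · intro b h hlt ih
    rw [aBsize, bBsize, if_pos hlt, if_pos hlt, ih]
  · intro b h hlt
    rw [aBsize, bBsize, if_neg hlt, if_neg hlt]

-- the bsize loop returns b times a power of two
theorem bsize_pow (size b : Int) (h : 0 < b) : ∃ m : ℕ, aBsize size b h = b * 2 ^ m := by
  refine aBsize.induct size (motive := fun b h => ∃ m : ℕ, aBsize size b h = b * 2 ^ m) ?_ ?_ b h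
  · intro b h hlt ih
    obtain ⟨m, hm⟩ := ih
    exact ⟨m + 1, by rw [aBsize, if_pos hlt, hm]; ring⟩
  · intro b h hlt
    exact ⟨0, by rw [aBsize, if_neg hlt]; ring⟩

-- one block: list(range(k, k+j))
def blk (j k : Int) : List Int := PySem.List.pyRange k (k + j) 1

-- the level of n consecutive blocks of width j starting at a
def lvl (a j : Int) : ℕ → List (List Int)
  | 0 => []
  | n + 1 => blk j a :: lvl (a + j) j n

theorem lvl_length (j : Int) : ∀ (n : ℕ) (a : Int), (lvl a j n).length = n
  | 0, _ => rfl
  | n + 1, a => by simp [lvl, lvl_length j n]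

theorem lvl_closed (j : Int) : ∀ (n : ℕ) (a : Int),
    lvl a j n = (List.range n).map (fun k : ℕ => blk j (a + j * (k : Int))) := by
  intro n
  induction n with
  | zero => intro a; simp [lvl]
  | succ n ih =>
    intro a
    rw [List.range_succ_eq_map, List.map_cons, List.map_map, lvl, ih]
    congr 1
    · simp [blk]
    · apply List.map_congr_left
      intro k _
      simp only [Function.comp_apply]
      congr 1
      push_cast
      ring

-- A's stride-j comprehension over range(a, a + j*n, j) is the level of n blocks
theorem rangeMap (j a : Int) (hj : 0 < j) (n : ℕ) :
    (PySem.List.pyRange a (a + j * n) j).map (fun k => PySem.List.pyRange k (k + j) 1)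
      = lvl a j n := by
  rw [PySem.List.pyRange_of_pos _ _ hj, lvl_closed, List.map_map]
  rcases Nat.eq_zero_or_pos n with hn | hn
  · subst hn; simp
  · have hlt : a < a + j * n := by
      have h1 : (1 : Int) ≤ n := by exact_mod_cast hn
      nlinarith
    rw [if_pos hlt]
    have hdiv : (a + j * ↑n - a + j - 1) / j = (n : Int) := by
      rw [show a + j * (n : Int) - a + j - 1 = (j - 1) + (n : Int) * j by ring,
          Int.add_mul_ediv_right _ _ (by omega : j ≠ 0),
          Int.ediv_eq_zero_of_lt (by omega) (by omega)]
      simp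
    rw [hdiv]
    simp only [Int.toNat_natCast]
    apply List.map_congr_left
    intro k _
    simp only [Function.comp_apply, blk]

-- merging adjacent pairs of 2*t blocks of width j gives t blocks of width 2*j
theorem merge_lvl (j : Int) (hj : 0 < j) : ∀ (t : ℕ) (a : Int),
    mergePairs (lvl a j (2 * t)) = lvl a (2 * j) t := by
  intro t
  induction t with
  | zero => intro a; simp [lvl, mergePairs]
  | succ t ih =>
    intro a
    rw [show 2 * (t + 1) = (2 * t) + 1 + 1 by ring]
    simp only [lvl, mergePairs, ih]
    rw [show a + j + j = a + 2 * j by ring]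
    congr 1
    unfold blk
    rw [show a + j + j = a + 2 * j by ring,
        PySem.List.pyRange_one_append a (a + j) (a + 2 * j) (by omega) (by omega)]

-- main loop correspondence, reduced = false: A's stride loop equals B's merge loop
theorem loop_eq : ∀ (m : ℕ) (j a : Int) (hj : 0 < j),
    aLoop (j * 2 ^ m) a j false hj = bLoop (lvl a j (2 ^ m)) false := by
  intro m
  induction m with
  | zero =>
    intro j a hj
    rw [aLoop, bLoop]
    simp [lvl_length]
  | succ m ih =>
    intro j a hj
    have hjm : j < j * 2 ^ (m + 1) := by
      have h1 : (2 : Int) ≤ 2 ^ (m + 1) := by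
        calc (2 : Int) = 2 ^ 1 := by norm_num
        _ ≤ 2 ^ (m + 1) := by apply pow_le_pow_right₀ <;> omega
      nlinarith
    have hlen : (lvl a j (2 ^ (m + 1))).length > 1 := by
      rw [lvl_length]
      have : 2 ^ 1 ≤ 2 ^ (m + 1) := Nat.pow_le_pow_right (by omega) (by omega)
      omega
    rw [aLoop, if_pos hjm, bLoop, if_pos hlen]
    have hmerge : mergePairs (lvl a j (2 ^ (m + 1))) = lvl a (2 * j) (2 ^ m) := by
      rw [show 2 ^ (m + 1) = 2 * 2 ^ m by ring, merge_lvl j hj]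
    have hrange : (PySem.List.pyRange a (j * 2 ^ (m + 1) + a) (2 * j)).map
        (fun k => PySem.List.pyRange k (k + 2 * j) 1) = lvl a (2 * j) (2 ^ m) := by
      have h2 := rangeMap (2 * j) a (by omega) (2 ^ m)
      have hcast : a + 2 * j * (((2 : ℕ) ^ m : ℕ) : Int) = j * 2 ^ (m + 1) + a := by
        push_cast; ring
      rw [hcast] at h2
      exact h2
    rw [hmerge, hrange]
    simp only [Bool.false_eq_true, if_false]
    congr 1
    have h3 := ih (2 * j) a (by omega)
    rw [show 2 * j * 2 ^ m = j * 2 ^ (m + 1) by ring] at h3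
    exact h3

-- the initial singleton blocks are the width-1 level
theorem init_lvl (a : Int) (n : ℕ) :
    (PySem.List.pyRange a (a + (n : Int)) 1).map (fun x => [x]) = lvl a 1 n := by
  rw [show a + (n : Int) = a + 1 * n by ring, ← rangeMap 1 a one_pos n]
  apply List.map_congr_left
  intro k _
  exact (PySem.List.pyRange_one_singleton k).symm

-- ===== VERDICT (by name: the statement is the Claim_ definition above) =====
theorem bracket_sections_spec : Claim_equal_bracket_sections := by
  intro size inc reduced _ hpre
  unfold Pre_bracket_sections at hpre
  subst hpre
  unfold Spec_bracket_sections bracket_sections bracket_sections_alt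
  rw [← bsize_eq size 1 one_pos]
  obtain ⟨m, hm⟩ := bsize_pow size 1 one_pos
  rw [hm]
  have h1 : (1 : Int) * 2 ^ m = ((2 ^ m : ℕ) : Int) := by push_cast; ring
  rw [h1, init_lvl inc (2 ^ m)]
  have h2 := loop_eq m 1 inc one_pos
  rw [h1] at h2
  exact h2
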